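-- pv_equiv track=rewrite | github.com/sdu-lifei/telegram_res_search | pansou_py/utils/link_parser.py | clean_baidu_pan_url
-- ===== SOURCE A (Python) =====
-- def clean_baidu_pan_url(url: str) -> str:
--     if "https://pan.baidu.com/s/" in url:
--         start_idx = url.find("https://pan.baidu.com/s/")
--         url = url[start_idx:]
--         end_markers = [" ", "\n", "\t", "，", "。", "；", ";", ",", "?pwd="]
--         min_end_idx = len(url)
--         for marker in end_markers:
--             idx = url.find(marker)
--             if 0 < idx < min_end_idx:
--                 min_end_idx = idx
--         if min_end_idx < len(url):
--             url = url[:min_end_idx]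
--
--         if "?pwd=" in url:
--             pwd_idx = url.find("?pwd=")
--             if len(url) > pwd_idx + 5:
--                 pwd_end_idx = pwd_idx + 9
--                 if pwd_end_idx <= len(url):
--                     return url[:pwd_end_idx]
--                 return url
--     return url
-- ===== SOURCE B (Python) =====
-- def clean_baidu_pan_url(url: str) -> str:
--     prefix = "https://pan.baidu.com/s/"
--     i = url.find(prefix)
--     if i < 0:
--         return url
--     url = url[i:]
--     delims = " \n\t，。；;,"
--     for j in range(len(url)):
--         if url[j] in delims or url.startswith("?pwd=", j):
--             return url[:j]
--     return url
-- ===== Notes on version B (the rewrite author's own statement) =====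
-- stated objective: simpler
-- what changed: Replaced A's nine repeated str.find scans with a min-index accumulator (plus an unreachable pwd-trimming tail block) by a single left-to-right scan that truncates at the first end-marker occurrence.
import Mathlib
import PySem

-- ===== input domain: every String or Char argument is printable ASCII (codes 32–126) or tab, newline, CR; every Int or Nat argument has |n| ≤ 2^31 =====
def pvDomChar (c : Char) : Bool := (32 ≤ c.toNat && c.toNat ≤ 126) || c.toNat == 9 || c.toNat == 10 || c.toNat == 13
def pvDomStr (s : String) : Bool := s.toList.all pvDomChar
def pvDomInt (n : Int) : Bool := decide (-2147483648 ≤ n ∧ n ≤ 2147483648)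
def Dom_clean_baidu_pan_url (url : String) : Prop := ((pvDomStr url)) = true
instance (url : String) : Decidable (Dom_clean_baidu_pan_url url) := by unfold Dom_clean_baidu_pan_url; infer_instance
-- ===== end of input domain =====

-- B replaces A's nine repeated `find` scans plus a min-index accumulator (and A's unreachable
-- pwd-trimming tail block) by one left-to-right scan that stops at the first end marker; objective: simpler.

-- ===== PORT A =====
def clean_baidu_pan_url (url : String) : String :=
  if PySem.Str.isIn "https://pan.baidu.com/s/" url then
    let start_idx := PySem.Str.find url "https://pan.baidu.com/s/"
    let url1 := PySem.Str.slice url (some start_idx) none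
    let endMarkers : List String := [" ", "\n", "\t", "，", "。", "；", ";", ",", "?pwd="]
    let minEnd := endMarkers.foldl (fun acc marker =>
        let idx := PySem.Str.find url1 marker
        if 0 < idx ∧ idx < acc then idx else acc) (PySem.Str.len url1)
    let url2 := if minEnd < PySem.Str.len url1 then PySem.Str.slice url1 none (some minEnd) else url1
    if PySem.Str.isIn "?pwd=" url2 then
      let pwd_idx := PySem.Str.find url2 "?pwd="
      if PySem.Str.len url2 > pwd_idx + 5 then
        let pwd_end_idx := pwd_idx + 9
        if pwd_end_idx ≤ PySem.Str.len url2 then PySem.Str.slice url2 none (some pwd_end_idx)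
        else url2
      else url2
    else url2
  else url

-- ===== PORT B =====
def pvDelims : List Char := [' ', '\n', '\t', '，', '。', '；', ';', ',']
def pvPwd : List Char := ['?', 'p', 'w', 'd', '=']

-- B's `for j in range(len(url))` loop: the first position carrying a delimiter char or the
-- start of the pwd marker, scanned left to right over the suffix list.
def pvScan : List Char → Option Nat
  | [] => none
  | c :: rest =>
      if c ∈ pvDelims || pvPwd.isPrefixOf (c :: rest) then some 0
      else (pvScan rest).map (· + 1)

def clean_baidu_pan_url_alt (url : String) : String :=
  let i := PySem.Str.find url "https://pan.baidu.com/s/"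
  if i < 0 then url
  else
    let s := (PySem.Str.slice url (some i) none).toList
    match pvScan s with
    | some j => String.ofList (s.take j)
    | none => String.ofList s

-- ===== PRECONDITION & SPEC =====
def Spec_clean_baidu_pan_url (url : String) (out : String) : Prop := out = clean_baidu_pan_url_alt url
instance (url : String) (out : String) : Decidable (Spec_clean_baidu_pan_url url out) := by unfold Spec_clean_baidu_pan_url; infer_instance

-- ===== CLAIM (what is proved, stated in full; the proofs are below) =====
def Claim_equal_clean_baidu_pan_url : Prop := ∀ (url : String), Dom_clean_baidu_pan_url url → Spec_clean_baidu_pan_url url (clean_baidu_pan_url url)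

-- ===== LEMMAS AND PROOFS =====

-- A's end markers, as character lists
def pvMarkers : List (List Char) := [[' '], ['\n'], ['\t'], ['，'], ['。'], ['；'], [';'], [','], pvPwd]

-- A's end markers, as the strings the port of A folds over
def pvMarkersS : List String := [" ", "\n", "\t", "，", "。", "；", ";", ",", "?pwd="]

-- the test B applies at one scan position
def pvCond (t : List Char) : Bool :=
  match t with
  | [] => false
  | c :: _ => decide (c ∈ pvDelims) || pvPwd.isPrefixOf t

theorem pvCond_iff (t : List Char) : pvCond t = true ↔ ∃ m ∈ pvMarkers, m <+: t := by
  match t with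
  | [] => simp [pvCond, pvMarkers, pvPwd]
  | c :: r =>
    simp only [pvCond, Bool.or_eq_true, decide_eq_true_eq, List.isPrefixOf_iff_prefix,
      pvMarkers, pvDelims, List.mem_cons, List.not_mem_nil, or_false]
    constructor
    · rintro (h | h)
      · refine ⟨[c], ?_, List.cons_prefix_cons.mpr ⟨rfl, List.nil_prefix⟩⟩
        rcases h with rfl | rfl | rfl | rfl | rfl | rfl | rfl | rfl <;> tauto
      · exact ⟨pvPwd, by tauto, h⟩
    · rintro ⟨m, hm, hp⟩
      rcases hm with rfl | rfl | rfl | rfl | rfl | rfl | rfl | rfl | rfl <;>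
        [skip; skip; skip; skip; skip; skip; skip; skip; exact Or.inr hp] <;>
        · left
          rw [List.cons_prefix_cons] at hp
          tauto

theorem pvScan_some (s : List Char) (j : Nat) (h : pvScan s = some j) :
    pvCond (s.drop j) = true ∧ (∀ i < j, pvCond (s.drop i) = false) ∧ j < s.length := by
  induction s generalizing j with
  | nil => simp [pvScan] at h
  | cons c r ih =>
    rw [pvScan] at h
    by_cases hc : (c ∈ pvDelims || pvPwd.isPrefixOf (c :: r)) = true
    · simp [hc] at h
      subst h
      refine ⟨?_, by omega, by simp⟩
      exact hc
    · simp [hc] at h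
      obtain ⟨j', hj', rfl⟩ := h
      obtain ⟨h1, h2, h3⟩ := ih j' hj'
      refine ⟨by simpa using h1, ?_, by simpa using h3⟩
      intro i hi
      match i with
      | 0 => exact Bool.not_eq_true _ |>.mp hc
      | i + 1 => exact h2 i (by omega)

theorem pvScan_none (s : List Char) (h : pvScan s = none) :
    ∀ j, pvCond (s.drop j) = false := by
  induction s with
  | nil => intro j; simp [pvCond]
  | cons c r ih =>
    rw [pvScan] at h
    by_cases hc : (c ∈ pvDelims || pvPwd.isPrefixOf (c :: r)) = true
    · simp [hc] at h
    · simp [hc] at h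
      intro j
      match j with
      | 0 => exact Bool.not_eq_true _ |>.mp hc
      | j + 1 => simpa using ih h j

theorem pvFold_spec (f : String → Int) (ms : List String) (a : Int) :
    (ms.foldl (fun acc m => if 0 < f m ∧ f m < acc then f m else acc) a = a ∨
      ∃ m ∈ ms, ms.foldl (fun acc m => if 0 < f m ∧ f m < acc then f m else acc) a = f m ∧
        0 < f m) ∧
    ms.foldl (fun acc m => if 0 < f m ∧ f m < acc then f m else acc) a ≤ a ∧
    ∀ m ∈ ms, 0 < f m →
      ms.foldl (fun acc m => if 0 < f m ∧ f m < acc then f m else acc) a ≤ f m := by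
  induction ms generalizing a with
  | nil => simp
  | cons m ms ih =>
    simp only [List.foldl_cons]
    by_cases hm : 0 < f m ∧ f m < a
    · rw [if_pos hm]
      obtain ⟨h1, h2, h3⟩ := ih (f m)
      refine ⟨?_, by omega, ?_⟩
      · rcases h1 with h | ⟨m', hm', he, hp⟩
        · exact Or.inr ⟨m, by simp, h, hm.1⟩
        · exact Or.inr ⟨m', by simp [hm'], he, hp⟩
      · intro m' hm' hp
        rcases List.mem_cons.mp hm' with rfl | h
        · exact h2
        · exact h3 m' h hp
    · rw [if_neg hm]
      obtain ⟨h1, h2, h3⟩ := ih a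
      refine ⟨?_, h2, ?_⟩
      · rcases h1 with h | ⟨m', hm', he, hp⟩
        · exact Or.inl h
        · exact Or.inr ⟨m', by simp [hm'], he, hp⟩
      · intro m' hm' hp
        rcases List.mem_cons.mp hm' with rfl | h
        · omega
        · exact h3 m' h hp

theorem pvMarkers_repr : ∀ m ∈ pvMarkers, ∃ mS ∈ pvMarkersS, mS.toList = m := by decide

theorem pvMarkers_repr' : ∀ mS ∈ pvMarkersS, mS.toList ∈ pvMarkers := by decide

theorem pvFind_le {s m : List Char} {j : Nat} (h : m <+: s.drop j) :
    0 ≤ PySem.Chars.find s m ∧ PySem.Chars.find s m ≤ (j : Int) := by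
  have hin : PySem.Chars.isIn m s = true :=
    (PySem.Chars.exists_prefix_drop_iff_isIn m s).mp ⟨j, h⟩
  have hnn : 0 ≤ PySem.Chars.find s m :=
    (PySem.Chars.find_nonneg_iff s m).mpr ((PySem.Chars.isIn_iff_infix m s).mp hin)
  obtain ⟨-, hmin⟩ := PySem.Chars.find_spec hnn
  refine ⟨hnn, ?_⟩
  by_contra hlt
  have ht := Int.toNat_of_nonneg hnn
  exact hmin j (by omega) h

theorem pvMinEnd_some (s : List Char) (j : Nat) (hs : pvScan s = some j) (h0 : pvCond s = false) :
    pvMarkersS.foldl (fun acc m =>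
        if 0 < PySem.Chars.find s m.toList ∧ PySem.Chars.find s m.toList < acc
        then PySem.Chars.find s m.toList else acc) ((s.length : Int)) = (j : Int) := by
  obtain ⟨hcj, hmin, hjlen⟩ := pvScan_some s j hs
  obtain ⟨m, hmmem, hmp⟩ := (pvCond_iff _).mp hcj
  obtain ⟨mS, hmS, hml⟩ := pvMarkers_repr m hmmem
  obtain ⟨h1, h2, h3⟩ := pvFold_spec (fun m => PySem.Chars.find s m.toList) pvMarkersS (s.length : Int)
  obtain ⟨hnn, hle⟩ := pvFind_le (m := m) hmp
  have hpos : 0 < PySem.Chars.find s m := by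
    rcases lt_or_eq_of_le hnn with h | h
    · exact h
    · exfalso
      have hsp := (PySem.Chars.find_spec hnn).1
      rw [← h] at hsp
      simp at hsp
      exact absurd ((pvCond_iff s).mpr ⟨m, hmmem, hsp⟩) (by simp [h0])
  have hub : pvMarkersS.foldl (fun acc m =>
      if 0 < PySem.Chars.find s m.toList ∧ PySem.Chars.find s m.toList < acc
      then PySem.Chars.find s m.toList else acc) ((s.length : Int)) ≤ (j : Int) := by
    have := h3 mS hmS (by rw [hml]; exact hpos)
    rw [hml] at this
    omega
  rcases h1 with h | ⟨m', hm', he, hp⟩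
  · omega
  · rw [he] at hub ⊢
    have hnn' : 0 ≤ PySem.Chars.find s m'.toList := hp.le
    have hsp := (PySem.Chars.find_spec hnn').1
    have hcr : pvCond (s.drop (PySem.Chars.find s m'.toList).toNat) = true :=
      (pvCond_iff _).mpr ⟨m'.toList, pvMarkers_repr' m' hm', hsp⟩
    have hge : j ≤ (PySem.Chars.find s m'.toList).toNat := by
      by_contra hltj
      have hltj' : (PySem.Chars.find s m'.toList).toNat < j := by omega
      exact absurd hcr (by simp [hmin _ hltj'])
    have ht := Int.toNat_of_nonneg hnn'
    omega

theorem pvMinEnd_none (s : List Char) (hs : pvScan s = none) :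
    pvMarkersS.foldl (fun acc m =>
        if 0 < PySem.Chars.find s m.toList ∧ PySem.Chars.find s m.toList < acc
        then PySem.Chars.find s m.toList else acc) ((s.length : Int)) = (s.length : Int) := by
  have hall := pvScan_none s hs
  obtain ⟨h1, h2, h3⟩ := pvFold_spec (fun m => PySem.Chars.find s m.toList) pvMarkersS (s.length : Int)
  rcases h1 with h | ⟨m', hm', he, hp⟩
  · exact h
  · exfalso
    have hnn' : 0 ≤ PySem.Chars.find s m'.toList := hp.le
    have hsp := (PySem.Chars.find_spec hnn').1
    exact absurd ((pvCond_iff _).mpr ⟨m'.toList, pvMarkers_repr' m' hm', hsp⟩)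
      (by simp [hall _])

theorem pvNotIn_of_all_not_cond (s sub : List Char) (hm : sub ∈ pvMarkers)
    (hall : ∀ i, pvCond (s.drop i) = false) : PySem.Chars.isIn sub s = false := by
  rw [← Bool.not_eq_true]
  intro hin
  obtain ⟨k, hk⟩ := (PySem.Chars.exists_prefix_drop_iff_isIn sub s).mpr hin
  exact absurd ((pvCond_iff _).mpr ⟨sub, hm, hk⟩) (by simp [hall k])

theorem pvPwd_not_in_take (s : List Char) (j : Nat)
    (hmin : ∀ i < j, pvCond (s.drop i) = false) :
    PySem.Chars.isIn pvPwd (s.take j) = false := by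
  rw [← Bool.not_eq_true]
  intro hin
  obtain ⟨k, hk⟩ := (PySem.Chars.exists_prefix_drop_iff_isIn pvPwd (s.take j)).mpr hin
  by_cases hkj : k < j
  · have hd : (s.take j).drop k <+: s.drop k := (List.take_prefix j s).drop k
    have : pvPwd <+: s.drop k := hk.trans hd
    exact absurd ((pvCond_iff _).mpr ⟨pvPwd, by simp [pvMarkers], this⟩)
      (by simp [hmin k hkj])
  · have : (s.take j).drop k = [] := by
      apply List.drop_eq_nil_of_le
      simp
      omega
    rw [this, List.prefix_nil] at hk
    simp [pvPwd] at hk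

theorem pvCond_of_prefix (s : List Char) (hp : "https://pan.baidu.com/s/".toList <+: s) :
    pvCond s = false := by
  obtain ⟨t, ht⟩ := hp
  rw [← ht]
  rw [show "https://pan.baidu.com/s/".toList = 'h' :: "ttps://pan.baidu.com/s/".toList from rfl]
  simp [pvCond, pvDelims, pvPwd, List.isPrefixOf]

-- ===== VERDICT (by name: the statement is the Claim_ definition above) =====
theorem clean_baidu_pan_url_spec : Claim_equal_clean_baidu_pan_url := by
  intro url _
  show clean_baidu_pan_url url = clean_baidu_pan_url_alt url
  by_cases hin : PySem.Str.isIn "https://pan.baidu.com/s/" url = true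
  · have hinf := (PySem.Str.isIn_iff_infix _ _).mp hin
    have hnnC : 0 ≤ PySem.Chars.find url.toList ("https://pan.baidu.com/s/").toList :=
      (PySem.Chars.find_nonneg_iff _ _).mpr hinf
    have hnn : 0 ≤ PySem.Str.find url "https://pan.baidu.com/s/" := by
      rw [PySem.Str.find_eq]; exact hnnC
    set i := PySem.Str.find url "https://pan.baidu.com/s/" with hi
    have hs : (PySem.Str.slice url (some i) none).toList = url.toList.drop i.toNat := by
      rw [PySem.Str.toList_slice, PySem.Chars.slice_eq_listSlice, PySem.List.slice_from _ hnn]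
    set s : List Char := url.toList.drop i.toNat with hsdef
    have hp : "https://pan.baidu.com/s/".toList <+: s := by
      have := (PySem.Chars.find_spec hnnC).1
      rw [hsdef, hi, PySem.Str.find_eq]
      exact this
    have hc0 : pvCond s = false := pvCond_of_prefix s hp
    rw [clean_baidu_pan_url, clean_baidu_pan_url_alt]
    rw [if_pos hin, if_neg (by omega : ¬ i < 0)]
    have hiC : PySem.Chars.find url.toList "https://pan.baidu.com/s/".toList = i := by
      rw [hi, PySem.Str.find_eq]
    simp only [PySem.Str.find_eq, PySem.Str.len_eq, hiC, hs]
    rcases hscan : pvScan s with _ | j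
    · have hme := pvMinEnd_none s hscan
      simp only [pvMarkersS] at hme
      rw [hme]
      rw [if_neg (lt_irrefl ((s.length : Int)))]
      have hno : PySem.Str.isIn "?pwd=" (PySem.Str.slice url (some i) none) = false := by
        rw [PySem.Str.isIn_eq, hs]
        exact pvNotIn_of_all_not_cond s pvPwd (by simp [pvMarkers]) (pvScan_none s hscan)
      rw [hno]
      simp only [Bool.false_eq_true, if_false]
      rw [← hs]
      exact String.ofList_toList.symm
    · obtain ⟨-, hmin, hjlen⟩ := pvScan_some s j hscan
      have hme := pvMinEnd_some s j hscan hc0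
      simp only [pvMarkersS] at hme
      rw [hme]
      have hjc : ((j : Nat) : Int) < ((s.length : Nat) : Int) := by exact_mod_cast hjlen
      rw [if_pos hjc]
      have hu2 : (PySem.Str.slice (PySem.Str.slice url (some i) none) none (some (j : Int))).toList
          = s.take j := by
        rw [PySem.Str.toList_slice, PySem.Chars.slice_eq_listSlice, hs,
          PySem.List.slice_to _ (by omega : (0:Int) ≤ (j : Int))]
        simp
      have hno : PySem.Str.isIn "?pwd="
          (PySem.Str.slice (PySem.Str.slice url (some i) none) none (some (j : Int))) = false := by
        rw [PySem.Str.isIn_eq, hu2]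
        exact pvPwd_not_in_take s j hmin
      rw [hno]
      simp only [Bool.false_eq_true, if_false]
      apply String.toList_inj.mp
      rw [hu2, String.toList_ofList]
  · have hfind : PySem.Str.find url "https://pan.baidu.com/s/" = -1 := by
      rw [PySem.Str.find_eq]
      refine (PySem.Chars.find_eq_neg_one_iff _ _).mpr fun hc => hin ?_
      exact (PySem.Str.isIn_iff_infix _ _).mpr hc
    rw [clean_baidu_pan_url, clean_baidu_pan_url_alt, if_neg hin, hfind]
    norm_num
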